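-- pv_equiv track=rewrite | github.com/kky0426/TIL | Leetcode/leetcode_1743.py | restoreArray
-- ===== SOURCE A (Python) =====
-- from typing import List
--
-- import collections
--
-- def restoreArray(adjacentPairs: List[List[int]]) -> List[int]:
--     ans = []
--     dic=collections.defaultdict(list)
--     for i,j in adjacentPairs:
--         dic[i].append(j)
--         dic[j].append(i)
--
--     for k,v in dic.items():
--         if len(v)==1:
--             start = k
--             break
--
--     visit = set()
--     def dfs(num):
--         ans.append(num)
--         visit.add(num)
--         for i in dic[num]:
--             if i not in visit:
--                 dfs(i)
--     dfs(start)
--     return ans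
-- ===== SOURCE B (Python) =====
-- from typing import List
--
-- import collections
--
-- def restoreArray(adjacentPairs: List[List[int]]) -> List[int]:
--     dic = collections.defaultdict(list)
--     for i, j in adjacentPairs:
--         dic[i].append(j)
--         dic[j].append(i)
--
--     start = next(k for k, v in dic.items() if len(v) == 1)
--
--     ans = []
--     visit = set()
--     stack = [start]
--     while stack:
--         num = stack.pop()
--         if num in visit:
--             continue
--         visit.add(num)
--         ans.append(num)
--         stack.extend(reversed(dic[num]))
--     return ans
-- ===== Notes on version B (the rewrite author's own statement) =====
-- stated objective: alternative
-- what changed: A's recursive DFS (a nested dfs function recursing through the adjacency dict with a visited set) is replaced by an iterative traversal with an explicit stack: pop a vertex, skip it if visited, otherwise append it and push its neighbors in reverse, which visits vertices in exactly A's DFS order without recursion.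
import Mathlib
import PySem

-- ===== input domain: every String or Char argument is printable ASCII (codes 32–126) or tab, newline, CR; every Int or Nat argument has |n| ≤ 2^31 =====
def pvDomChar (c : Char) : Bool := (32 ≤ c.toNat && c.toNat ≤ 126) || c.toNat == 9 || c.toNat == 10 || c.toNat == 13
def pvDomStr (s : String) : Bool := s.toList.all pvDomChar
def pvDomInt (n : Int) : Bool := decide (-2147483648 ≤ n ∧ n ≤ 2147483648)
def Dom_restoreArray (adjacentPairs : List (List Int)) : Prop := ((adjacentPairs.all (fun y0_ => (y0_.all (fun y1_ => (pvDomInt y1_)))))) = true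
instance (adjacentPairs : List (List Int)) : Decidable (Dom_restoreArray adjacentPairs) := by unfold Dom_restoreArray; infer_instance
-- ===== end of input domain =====

-- B replaces A's recursive DFS by an iterative explicit-stack traversal (same adjacency dict,
-- same first-degree-1 start key, same visiting order); objective: alternative decomposition,
-- avoiding recursion. Equality of return values is proved on Pre_ (where the Python A returns).

-- ===== PORT A =====

-- both Pythons build the same adjacency dict: dic[i].append(j); dic[j].append(i) on a defaultdict(list)
def pvAdjStep (d : PySem.Dict Int (List Int)) (p : List Int) : PySem.Dict Int (List Int) :=
  match p with
  | [i, j] => (d.modify i [] (· ++ [j])).modify j [] (· ++ [i])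
  | _ => d  -- Python: 'i, j = p' raises ValueError here (pair not of length 2); excluded by Pre_

def pvBuildDic (ps : List (List Int)) : PySem.Dict Int (List Int) :=
  ps.foldl pvAdjStep PySem.Dict.empty

-- A's recursive dfs (ans/visit state threaded; fuel bounds the recursion DEPTH, which is at most
-- the number of distinct vertices, itself ≤ flatten.length — so the fuel passed below never runs out)
mutual
def pvDfsA (dic : PySem.Dict Int (List Int)) : Nat → List Int × PySem.Set Int → Int → List Int × PySem.Set Int
  | 0, st, _ => st
  | fuel + 1, st, num => pvForA dic fuel (st.1 ++ [num], PySem.Set.add st.2 num) (dic.getD num [])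
termination_by fuel _ _ => (fuel, 0)

def pvForA (dic : PySem.Dict Int (List Int)) : Nat → List Int × PySem.Set Int → List Int → List Int × PySem.Set Int
  | _, st, [] => st
  | fuel, st, n :: ns =>
    if PySem.Set.contains st.2 n then pvForA dic fuel st ns
    else pvForA dic fuel (pvDfsA dic fuel st n) ns
termination_by fuel _ ns => (fuel, ns.length + 1)
end

def restoreArray (adjacentPairs : List (List Int)) : List Int :=
  let dic := pvBuildDic adjacentPairs
  match dic.items.find? (fun kv => kv.2.length == 1) with
  | some kv => (pvDfsA dic (adjacentPairs.flatten.length + 1) ([], PySem.Set.empty) kv.1).1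
  | none => []  -- Python: NameError ('start' never assigned); excluded by Pre_

-- ===== PORT B =====

-- B's while loop over an explicit stack (top = list head here; Source B pushes reversed(dic[num]) and
-- pops from the end, which is the same order). Fuel bounds the number of pops, which is at most
-- 1 + (total length of all adjacency lists) ≤ 1 + flatten.length — the fuel below never runs out.
def pvWalkB (dic : PySem.Dict Int (List Int)) : Nat → List Int × PySem.Set Int → List Int → List Int × PySem.Set Int
  | 0, st, _ => st
  | _ + 1, st, [] => st
  | fuel + 1, st, num :: stack =>
    if PySem.Set.contains st.2 num then pvWalkB dic fuel st stack
    else pvWalkB dic fuel (st.1 ++ [num], PySem.Set.add st.2 num) (dic.getD num [] ++ stack)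

def restoreArray_alt (adjacentPairs : List (List Int)) : List Int :=
  let dic := pvBuildDic adjacentPairs
  match dic.items.find? (fun kv => kv.2.length == 1) with
  | some kv => (pvWalkB dic (adjacentPairs.flatten.length + 2) ([], PySem.Set.empty) [kv.1]).1
  | none => []  -- Python: StopIteration from next(); excluded by Pre_

-- ===== PRECONDITION & SPEC =====
-- Pre_ excludes exactly the inputs where the Python A raises: a pair whose length is not 2
-- (ValueError on unpacking) or no vertex of degree 1 (NameError: 'start' is never assigned —
-- this covers the empty list and pure-cycle inputs).
def Pre_restoreArray (adjacentPairs : List (List Int)) : Prop :=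
  (∀ p ∈ adjacentPairs, p.length = 2) ∧
  ∃ x ∈ adjacentPairs.flatten, adjacentPairs.flatten.count x = 1

instance (adjacentPairs : List (List Int)) : Decidable (Pre_restoreArray adjacentPairs) := by
  unfold Pre_restoreArray; infer_instance

def pvWitness_restoreArray : List (List Int) := [[2, 1], [3, 4], [3, 2]]

def Spec_restoreArray (adjacentPairs : List (List Int)) (out : List Int) : Prop := out = restoreArray_alt adjacentPairs
instance (adjacentPairs : List (List Int)) (out : List Int) : Decidable (Spec_restoreArray adjacentPairs out) := by unfold Spec_restoreArray; infer_instance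

-- ===== CLAIM (what is proved, stated in full; the proofs are below) =====
def Claim_equal_restoreArray : Prop := ∀ (adjacentPairs : List (List Int)), Dom_restoreArray adjacentPairs → Pre_restoreArray adjacentPairs → Spec_restoreArray adjacentPairs (restoreArray adjacentPairs)

-- ===== LEMMAS AND PROOFS =====

-- pvPairs2 ps: the directed-edge list; the built dict is a single modify-fold over it,
-- which gives a closed form for every adjacency list and for the key list.
def pvPairs2 (ps : List (List Int)) : List (Int × Int) :=
  ps.flatMap (fun p => match p with | [i, j] => [(i, j), (j, i)] | _ => [])

-- number of dict keys not yet visited (the dfs recursion measure)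
def pvUnvis (dic : PySem.Dict Int (List Int)) (visit : PySem.Set Int) : Nat :=
  (dic.keys.filter (fun k => !(PySem.Set.contains visit k))).length

-- total adjacency-list length over unvisited keys
def pvS (dic : PySem.Dict Int (List Int)) (visit : PySem.Set Int) : Nat :=
  ((dic.keys.filter (fun k => !(PySem.Set.contains visit k))).map (fun k => (dic.getD k []).length)).sum

-- upper bound on the number of pops B's while loop still performs (strictly decreases each pop)
def pvCost (dic : PySem.Dict Int (List Int)) (visit : PySem.Set Int) (stack : List Int) : Nat :=
  stack.length + pvS dic visit

-- B's loop run with exactly enough fuel (canonical form; pvWalkB with any adequate fuel equals it)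
def pvSB (dic : PySem.Dict Int (List Int)) (st : List Int × PySem.Set Int) (stack : List Int) : List Int × PySem.Set Int :=
  pvWalkB dic (pvCost dic st.2 stack) st stack

lemma pv_build_eq (ps : List (List Int)) (d : PySem.Dict Int (List Int)) :
    ps.foldl pvAdjStep d = (pvPairs2 ps).foldl (fun d q => d.modify q.1 [] (· ++ [q.2])) d := by
  induction ps generalizing d with
  | nil => simp [pvPairs2]
  | cons p ps ih =>
    have hstep : pvAdjStep d p =
        ((match p with | [i, j] => [(i, j), (j, i)] | _ => ([] : List (Int × Int)))).foldl
          (fun (d : PySem.Dict Int (List Int)) (q : Int × Int) => d.modify q.1 [] (· ++ [q.2])) d := by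
      match p with
      | [] => rfl
      | [_] => rfl
      | [_, _] => rfl
      | _ :: _ :: _ :: _ => rfl
    rw [List.foldl_cons, ih, hstep]
    simp only [pvPairs2, List.flatMap_cons, List.foldl_append]

lemma pv_getD_build (ps : List (List Int)) (k : Int) :
    (pvBuildDic ps).getD k [] = ((pvPairs2 ps).filter (fun q => q.1 == k)).map (·.2) := by
  unfold pvBuildDic
  rw [pv_build_eq]
  rw [PySem.Dict.getD_foldl_modify_append]
  simp [PySem.Dict.getD_empty]

lemma pv_keys_build (ps : List (List Int)) :
    (pvBuildDic ps).keys = PySem.Set.ofList ((pvPairs2 ps).map (·.1)) := by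
  unfold pvBuildDic
  rw [pv_build_eq]
  rw [PySem.Dict.keys_foldl_modify_key (pvPairs2 ps) (fun q => q.1) [] (fun _ q => (· ++ [q.2])) PySem.Dict.empty]
  simp [PySem.Dict.keys_empty, PySem.Set.update, PySem.Set.ofList_eq_foldl]

lemma pv_nodup_keys_build (ps : List (List Int)) : (pvBuildDic ps).keys.Nodup := by
  unfold pvBuildDic
  rw [pv_build_eq]
  exact PySem.Dict.nodup_keys_foldl_modify_key (pvPairs2 ps) (fun q => q.1) [] (fun _ q => (· ++ [q.2]))
    PySem.Dict.empty (by simp [PySem.Dict.keys_empty])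

lemma pv_pairs2_len (ps : List (List Int)) : (pvPairs2 ps).length ≤ ps.flatten.length := by
  induction ps with
  | nil => simp [pvPairs2]
  | cons p ps ih =>
    simp only [pvPairs2, List.flatMap_cons, List.length_append, List.flatten_cons] at *
    have : (match p with | [i, j] => [(i, j), (j, i)] | _ => ([] : List (Int × Int))).length ≤ p.length := by
      match p with
      | [] => simp
      | [_] => simp
      | [_, _] => simp
      | _ :: _ :: _ :: _ => simp
    omega

lemma pv_keys_len (ps : List (List Int)) : (pvBuildDic ps).keys.length ≤ ps.flatten.length := by
  rw [pv_keys_build]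
  have h1 : (PySem.Set.ofList ((pvPairs2 ps).map (·.1))).Nodup := PySem.Set.nodup_ofList _
  have h2 : (PySem.Set.ofList ((pvPairs2 ps).map (·.1))) ⊆ ((pvPairs2 ps).map (·.1)) := by
    intro a ha; rw [PySem.Set.mem_ofList] at ha; exact ha
  calc (PySem.Set.ofList ((pvPairs2 ps).map (·.1))).length
      = (PySem.Set.ofList ((pvPairs2 ps).map (·.1))).toFinset.card := (List.toFinset_card_of_nodup h1).symm
    _ ≤ ((pvPairs2 ps).map (·.1)).toFinset.card := Finset.card_le_card (by
        intro a ha; simp only [List.mem_toFinset] at *; exact h2 ha)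
    _ ≤ ((pvPairs2 ps).map (·.1)).length := List.toFinset_card_le _
    _ = (pvPairs2 ps).length := by simp
    _ ≤ ps.flatten.length := pv_pairs2_len ps

lemma pv_countP_add_of_disjoint {β : Type} (l : List β) (p q : β → Bool)
    (h : ∀ x ∈ l, ¬(p x = true ∧ q x = true)) :
    l.countP p + l.countP q = l.countP (fun x => p x || q x) := by
  induction l with
  | nil => simp
  | cons a l ih =>
    have ha := h a (by simp)
    have hl : ∀ x ∈ l, ¬(p x = true ∧ q x = true) := fun x hx => h x (by simp [hx])
    simp only [List.countP_cons]
    rw [← ih hl]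
    by_cases hp : p a
    · by_cases hq : q a
      · exact absurd ⟨hp, hq⟩ ha
      · simp [hp, hq]; omega
    · by_cases hq : q a
      · simp [hp, hq]
        omega
      · simp [hp, hq]

lemma pv_countP_partition (K : List Int) (l : List (Int × Int)) (hnd : K.Nodup) :
    (K.map (fun k => l.countP (fun q => q.1 == k))).sum = l.countP (fun q => decide (q.1 ∈ K)) := by
  induction K with
  | nil => simp
  | cons k K ih =>
    rcases List.nodup_cons.mp hnd with ⟨hk, hnd'⟩
    simp only [List.map_cons, List.sum_cons, ih hnd']
    rw [pv_countP_add_of_disjoint l (fun q => q.1 == k) (fun q => decide (q.1 ∈ K))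
      (by intro x _ ⟨h1, h2⟩; simp at h1 h2; exact hk (h1 ▸ h2))]
    apply List.countP_congr
    intro x _
    by_cases h1 : x.1 = k <;> simp [h1]

lemma pv_S_empty (ps : List (List Int)) :
    pvS (pvBuildDic ps) PySem.Set.empty ≤ ps.flatten.length := by
  unfold pvS
  rw [List.filter_congr (q := fun _ => true) (by
    intro k _
    simp [PySem.Set.empty])]
  rw [List.filter_true]
  have hmap : (pvBuildDic ps).keys.map (fun k => ((pvBuildDic ps).getD k []).length)
      = (pvBuildDic ps).keys.map (fun k => (pvPairs2 ps).countP (fun q => q.1 == k)) := by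
    apply List.map_congr_left
    intro k _
    rw [pv_getD_build]
    simp [← List.countP_eq_length_filter]
  rw [hmap, pv_countP_partition _ _ (pv_nodup_keys_build ps)]
  exact le_trans List.countP_le_length (pv_pairs2_len ps)

lemma pv_unvis_empty (ps : List (List Int)) :
    pvUnvis (pvBuildDic ps) PySem.Set.empty = (pvBuildDic ps).keys.length := by
  unfold pvUnvis
  rw [List.filter_congr (q := fun _ => true) (by
    intro k _
    simp [PySem.Set.empty])]
  simp

lemma pv_filter_perm (l : List Int) (p q : Int → Bool) (num : Int) (hnd : l.Nodup)
    (hmem : num ∈ l) (hq : q num = true) (hp : p num = false)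
    (hagree : ∀ x, x ≠ num → p x = q x) :
    (l.filter q).Perm (num :: l.filter p) := by
  induction l with
  | nil => simp at hmem
  | cons a l ih =>
    rcases List.nodup_cons.mp hnd with ⟨ha, hnd'⟩
    by_cases hax : a = num
    · subst hax
      have hfl : l.filter q = l.filter p := by
        apply List.filter_congr
        intro x hx
        exact (hagree x (fun hxe => ha (hxe ▸ hx))).symm
      simp [hq, hp, hfl]
    · have hmem' : num ∈ l := by
        cases List.mem_cons.mp hmem with
        | inl h => exact absurd h.symm hax
        | inr h => exact h
      have hpq : p a = q a := hagree a hax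
      by_cases hqa : q a = true
      · have hpa : p a = true := hpq.trans hqa
        simp only [List.filter_cons, hqa, hpa, if_true]
        exact ((ih hnd' hmem').cons a).trans (List.Perm.swap num a _)
      · have hqa' : q a = false := by simpa using hqa
        have hpa : p a = false := hpq.trans hqa'
        simp only [List.filter_cons, hqa', hpa, Bool.false_eq_true, if_false]
        exact ih hnd' hmem'

lemma pv_unvis_add (dic : PySem.Dict Int (List Int)) (visit : PySem.Set Int) (num : Int)
    (hnd : dic.keys.Nodup) (hK : num ∈ dic.keys) (hv : PySem.Set.contains visit num = false) :
    pvUnvis dic (PySem.Set.add visit num) + 1 = pvUnvis dic visit := by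
  have hperm := pv_filter_perm dic.keys (fun k => !(PySem.Set.contains (PySem.Set.add visit num) k))
    (fun k => !(PySem.Set.contains visit k)) num hnd hK
    (by simp at hv; simpa using hv) (by simp)
    (by intro x hx; simp [hx])
  have := hperm.length_eq
  simp only [pvUnvis, List.length_cons] at *
  omega

lemma pv_S_add (dic : PySem.Dict Int (List Int)) (visit : PySem.Set Int) (num : Int)
    (hnd : dic.keys.Nodup) (hK : num ∈ dic.keys) (hv : PySem.Set.contains visit num = false) :
    pvS dic visit = (dic.getD num []).length + pvS dic (PySem.Set.add visit num) := by
  have hperm := pv_filter_perm dic.keys (fun k => !(PySem.Set.contains (PySem.Set.add visit num) k))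
    (fun k => !(PySem.Set.contains visit k)) num hnd hK
    (by simp at hv; simpa using hv) (by simp)
    (by intro x hx; simp [hx])
  have := (hperm.map (fun k => (dic.getD k []).length)).sum_eq
  simpa [pvS] using this

lemma pv_unvis_add_notkey (dic : PySem.Dict Int (List Int)) (visit : PySem.Set Int) (num : Int)
    (hK : num ∉ dic.keys) :
    pvUnvis dic (PySem.Set.add visit num) = pvUnvis dic visit := by
  unfold pvUnvis
  congr 1
  apply List.filter_congr
  intro k hk
  have : k ≠ num := fun h => hK (h ▸ hk)
  simp [this]

lemma pv_S_add_notkey (dic : PySem.Dict Int (List Int)) (visit : PySem.Set Int) (num : Int)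
    (hK : num ∉ dic.keys) :
    pvS dic (PySem.Set.add visit num) = pvS dic visit := by
  unfold pvS
  congr 2
  apply List.filter_congr
  intro k hk
  have : k ≠ num := fun h => hK (h ▸ hk)
  simp [this]

lemma pv_getD_notkey (dic : PySem.Dict Int (List Int)) (num : Int) (hK : num ∉ dic.keys) :
    dic.getD num [] = [] := by
  apply PySem.Dict.getD_of_not_contains
  rw [← Bool.not_eq_true, PySem.Dict.contains_iff_mem_keys]; exact hK

lemma pv_forA_nil (dic : PySem.Dict Int (List Int)) (fuel : Nat) (st : List Int × PySem.Set Int) :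
    pvForA dic fuel st [] = st := by
  simp [pvForA]

lemma pv_walkB_nil (dic : PySem.Dict Int (List Int)) (fuel : Nat) (st : List Int × PySem.Set Int) :
    pvWalkB dic fuel st [] = st := by
  cases fuel <;> simp [pvWalkB]

-- visit only grows along A's loop
lemma pv_visit_sub_forA (dic : PySem.Dict Int (List Int)) :
    ∀ (fuel : Nat) (ns : List Int) (st : List Int × PySem.Set Int) (x : Int),
      x ∈ st.2 → x ∈ (pvForA dic fuel st ns).2 := by
  intro fuel
  induction fuel using Nat.strong_induction_on with
  | _ fuel ihf =>
    intro ns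
    induction ns generalizing fuel with
    | nil => intro st x hx; rw [pv_forA_nil]; exact hx
    | cons n ns ihns =>
      intro st x hx
      rw [pvForA]
      by_cases hv : PySem.Set.contains st.2 n = true
      · rw [if_pos hv]; exact ihns fuel ihf st x hx
      · rw [if_neg hv]
        apply ihns fuel ihf
        match fuel with
        | 0 => simp only [pvDfsA]; exact hx
        | f + 1 =>
          rw [pvDfsA]
          apply ihf f (by omega)
          simp only []
          rw [PySem.Set.mem_add]
          left; exact hx

lemma pv_unvis_le_forA (dic : PySem.Dict Int (List Int)) (fuel : Nat) (ns : List Int)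
    (st : List Int × PySem.Set Int) :
    pvUnvis dic (pvForA dic fuel st ns).2 ≤ pvUnvis dic st.2 := by
  unfold pvUnvis
  rw [← List.countP_eq_length_filter, ← List.countP_eq_length_filter]
  apply List.countP_mono_left
  intro k hk h
  simp only [Bool.not_eq_true', PySem.Set.contains_eq_decide, decide_eq_false_iff_not] at h ⊢
  intro hmem
  exact h (pv_visit_sub_forA dic fuel ns st k hmem)

-- B's loop is fuel-stable once the fuel covers pvCost (which strictly decreases at each pop)
lemma pv_cost_new (dic : PySem.Dict Int (List Int)) (visit : PySem.Set Int) (n : Int)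
    (stack : List Int) (hnd : dic.keys.Nodup) (hv : PySem.Set.contains visit n = false) :
    pvCost dic visit (n :: stack) = pvCost dic (PySem.Set.add visit n) (dic.getD n [] ++ stack) + 1 := by
  by_cases hK : n ∈ dic.keys
  · have hS := pv_S_add dic visit n hnd hK hv
    simp only [pvCost, List.length_cons, List.length_append]
    omega
  · have h0 := pv_getD_notkey dic n hK
    have hS := pv_S_add_notkey dic visit n hK
    simp only [pvCost, List.length_cons, h0, List.nil_append]
    omega

lemma pv_walkB_stable (dic : PySem.Dict Int (List Int)) (hnd : dic.keys.Nodup) :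
    ∀ (fuel : Nat) (st : List Int × PySem.Set Int) (stack : List Int),
      pvCost dic st.2 stack ≤ fuel → pvWalkB dic fuel st stack = pvSB dic st stack := by
  intro fuel
  induction fuel using Nat.strong_induction_on with
  | _ fuel ih =>
    intro st stack hc
    match stack with
    | [] => rw [pv_walkB_nil, pvSB, pv_walkB_nil]
    | n :: stack' =>
      have h1 : 1 ≤ pvCost dic st.2 (n :: stack') := by
        simp only [pvCost, List.length_cons]; omega
      obtain ⟨f, rfl⟩ : ∃ f, fuel = f + 1 := ⟨fuel - 1, by omega⟩
      by_cases hv : PySem.Set.contains st.2 n = true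
      · have hcs : pvCost dic st.2 (n :: stack') = pvCost dic st.2 stack' + 1 := by
          simp only [pvCost, List.length_cons]; omega
        rw [pvWalkB, if_pos hv, pvSB, hcs, pvWalkB, if_pos hv]
        rw [ih f (by omega) st stack' (by omega),
            ih (pvCost dic st.2 stack') (by omega) st stack' (by omega)]
      · have hv' : PySem.Set.contains st.2 n = false := by simpa using hv
        have hcs := pv_cost_new dic st.2 n stack' hnd hv'
        rw [pvWalkB, if_neg hv, pvSB, hcs, pvWalkB, if_neg hv]
        have hc2 : pvCost dic (PySem.Set.add st.2 n) (dic.getD n [] ++ stack') ≤ f := by omega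
        rw [ih f (by omega) _ _ hc2,
            ih (pvCost dic (PySem.Set.add st.2 n) (dic.getD n [] ++ stack')) (by omega) _ _ le_rfl]

lemma pv_SB_nil (dic : PySem.Dict Int (List Int)) (st : List Int × PySem.Set Int) :
    pvSB dic st [] = st := by
  rw [pvSB, pv_walkB_nil]

lemma pv_SB_visited (dic : PySem.Dict Int (List Int)) (hnd : dic.keys.Nodup)
    (st : List Int × PySem.Set Int) (n : Int) (stack : List Int)
    (h : PySem.Set.contains st.2 n = true) :
    pvSB dic st (n :: stack) = pvSB dic st stack := by
  have h1 : 1 ≤ pvCost dic st.2 (n :: stack) := by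
    simp only [pvCost, List.length_cons]; omega
  have hcs : pvCost dic st.2 (n :: stack) = pvCost dic st.2 stack + 1 := by
    simp only [pvCost, List.length_cons]; omega
  rw [pvSB, hcs, pvWalkB, if_pos h]
  exact pv_walkB_stable dic hnd _ _ _ (by omega)

lemma pv_SB_new (dic : PySem.Dict Int (List Int)) (hnd : dic.keys.Nodup)
    (st : List Int × PySem.Set Int) (n : Int) (stack : List Int)
    (h : PySem.Set.contains st.2 n = false) :
    pvSB dic st (n :: stack) = pvSB dic (st.1 ++ [n], PySem.Set.add st.2 n) (dic.getD n [] ++ stack) := by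
  have hcs := pv_cost_new dic st.2 n stack hnd h
  rw [pvSB, hcs, pvWalkB, if_neg (by rw [h]; exact Bool.false_ne_true)]
  exact pv_walkB_stable dic hnd _ _ _ le_rfl

-- the simulation: running B's stack loop on ns ++ rest first performs exactly A's for-loop on ns
lemma pv_main (dic : PySem.Dict Int (List Int)) (hnd : dic.keys.Nodup) :
    ∀ (u : Nat) (visit : PySem.Set Int), pvUnvis dic visit ≤ u →
    ∀ (ns : List Int) (ans : List Int) (rest : List Int) (fuel : Nat),
      pvUnvis dic visit + 1 ≤ fuel →
      pvSB dic (ans, visit) (ns ++ rest) = pvSB dic (pvForA dic fuel (ans, visit) ns) rest := by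
  intro u
  induction u using Nat.strong_induction_on with
  | _ u ihu =>
    intro visit hu ns
    induction ns generalizing visit with
    | nil =>
      intro ans rest fuel _
      rw [pv_forA_nil]
      simp
    | cons n ns ihns =>
      intro ans rest fuel hf
      obtain ⟨f, rfl⟩ : ∃ f, fuel = f + 1 := ⟨fuel - 1, by omega⟩
      by_cases hv : PySem.Set.contains visit n = true
      · rw [List.cons_append, pv_SB_visited dic hnd (ans, visit) n (ns ++ rest) hv]
        rw [pvForA, if_pos hv]
        exact ihns visit hu ans rest (f + 1) hf
      · have hv' : PySem.Set.contains visit n = false := by simpa using hv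
        rw [List.cons_append, pv_SB_new dic hnd (ans, visit) n (ns ++ rest) hv']
        rw [pvForA, if_neg hv, pvDfsA]
        show pvSB dic (ans ++ [n], PySem.Set.add visit n) (dic.getD n [] ++ (ns ++ rest))
          = pvSB dic (pvForA dic (f + 1)
              (pvForA dic f (ans ++ [n], PySem.Set.add visit n) (dic.getD n [])) ns) rest
        by_cases hK : n ∈ dic.keys
        · have hdrop := pv_unvis_add dic visit n hnd hK hv'
          have h1 : pvUnvis dic (PySem.Set.add visit n) ≤ u - 1 := by omega
          rw [ihu (u - 1) (by omega) (PySem.Set.add visit n) h1 (dic.getD n [])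
              (ans ++ [n]) (ns ++ rest) f (by omega)]
          have hm : pvUnvis dic (pvForA dic f (ans ++ [n], PySem.Set.add visit n) (dic.getD n [])).2
              ≤ pvUnvis dic (PySem.Set.add visit n) :=
            pv_unvis_le_forA dic f (dic.getD n []) (ans ++ [n], PySem.Set.add visit n)
          have hstep := ihu (u - 1) (by omega)
            (pvForA dic f (ans ++ [n], PySem.Set.add visit n) (dic.getD n [])).2
            (by omega) ns
            (pvForA dic f (ans ++ [n], PySem.Set.add visit n) (dic.getD n [])).1
            rest (f + 1) (by omega)
          simpa using hstep
        · have hsame := pv_unvis_add_notkey dic visit n hK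
          have h0 := pv_getD_notkey dic n hK
          rw [h0, pv_forA_nil, List.nil_append]
          exact ihns (PySem.Set.add visit n) (by omega) (ans ++ [n]) rest (f + 1) (by omega)

-- ===== VERDICT (by name: the statement is the Claim_ definition above) =====
theorem restoreArray_spec : Claim_equal_restoreArray := by
  intro ps _ _
  unfold Spec_restoreArray
  simp only [restoreArray, restoreArray_alt]
  cases hf : (pvBuildDic ps).items.find? (fun kv => kv.2.length == 1) with
  | none => rfl
  | some kv =>
    have hnd := pv_nodup_keys_build ps
    have hempty : ¬(PySem.Set.contains (PySem.Set.empty : PySem.Set Int) kv.1 = true) := by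
      simp [PySem.Set.empty]
    have hfa : pvUnvis (pvBuildDic ps) PySem.Set.empty + 1 ≤ ps.flatten.length + 1 := by
      have h1 := pv_unvis_empty ps
      have h2 := pv_keys_len ps
      omega
    have hcost : pvCost (pvBuildDic ps) (([], PySem.Set.empty) : List Int × PySem.Set Int).2 [kv.1]
        ≤ ps.flatten.length + 2 := by
      have h1 := pv_S_empty ps
      simp only [pvCost, List.length_cons, List.length_nil]
      omega
    have hB : pvWalkB (pvBuildDic ps) (ps.flatten.length + 2) ([], PySem.Set.empty) [kv.1]
        = pvSB (pvBuildDic ps) ([], PySem.Set.empty) [kv.1] :=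
      pv_walkB_stable (pvBuildDic ps) hnd _ _ _ hcost
    have hmain := pv_main (pvBuildDic ps) hnd (pvUnvis (pvBuildDic ps) PySem.Set.empty)
      PySem.Set.empty le_rfl [kv.1] [] [] (ps.flatten.length + 1) hfa
    rw [List.append_nil, pv_SB_nil] at hmain
    have hA : pvForA (pvBuildDic ps) (ps.flatten.length + 1) ([], PySem.Set.empty) [kv.1]
        = pvDfsA (pvBuildDic ps) (ps.flatten.length + 1) ([], PySem.Set.empty) kv.1 := by
      rw [pvForA, if_neg hempty, pv_forA_nil]
    show (pvDfsA (pvBuildDic ps) (ps.flatten.length + 1) ([], PySem.Set.empty) kv.1).1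
      = (pvWalkB (pvBuildDic ps) (ps.flatten.length + 2) ([], PySem.Set.empty) [kv.1]).1
    rw [hB, hmain, hA]
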